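-- pv_equiv track=rewrite | github.com/exo7math/python1-exo7 | images/images.py | photomaton
-- ===== SOURCE A (Python) =====
-- def transformation(i,j,n):
--     if i%2 == 0 and j%2 == 0:
--         ii = i//2
--         jj = j//2
--     if i%2 == 0 and j%2 == 1:
--         ii = i//2
--         jj = (n+j)//2
--     if i%2 == 1 and j%2 == 0:
--         ii = (n+i)//2
--         jj = j//2
--     if i%2 == 1 and j%2 == 1:
--         ii = (n+i)//2
--         jj = (n+j)//2
--
--     return ii,jj
--
-- def photomaton(tableau):
--     n = len(tableau)
--     nouv_tableau = [[0 for j in range(n)] for i in range(n)]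
--
--     for i in range(n):
--         for j in range(n):
--             ii, jj = transformation(i,j,n)
--             nouv_tableau[ii][jj] = tableau[i][j]
--
--     return nouv_tableau
-- ===== SOURCE B (Python) =====
-- def photomaton(tableau):
--     n = len(tableau)
--
--     def deinterleave(cells):
--         evens, odds = [], []
--         for k, x in enumerate(cells):
--             (evens if k % 2 == 0 else odds).append(x)
--         return evens + odds
--
--     return [deinterleave([row[j] for j in range(n)]) for row in deinterleave(tableau)]
-- ===== Notes on version B (the rewrite author's own statement) =====
-- stated objective: faster
-- what changed: B replaces A's per-cell index permutation (zero grid + transformation() call + scattered indexed writes per cell) by two staged structural passes with no index arithmetic: a deinterleave pass that splits a sequence into its even- and odd-position elements by appending to two accumulators and concatenating, applied first to the list of rows and then to the first n cells of each row; the constant-factor win comes from dropping the per-cell transformation() call, // arithmetic and indexed writes.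
import Mathlib
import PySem

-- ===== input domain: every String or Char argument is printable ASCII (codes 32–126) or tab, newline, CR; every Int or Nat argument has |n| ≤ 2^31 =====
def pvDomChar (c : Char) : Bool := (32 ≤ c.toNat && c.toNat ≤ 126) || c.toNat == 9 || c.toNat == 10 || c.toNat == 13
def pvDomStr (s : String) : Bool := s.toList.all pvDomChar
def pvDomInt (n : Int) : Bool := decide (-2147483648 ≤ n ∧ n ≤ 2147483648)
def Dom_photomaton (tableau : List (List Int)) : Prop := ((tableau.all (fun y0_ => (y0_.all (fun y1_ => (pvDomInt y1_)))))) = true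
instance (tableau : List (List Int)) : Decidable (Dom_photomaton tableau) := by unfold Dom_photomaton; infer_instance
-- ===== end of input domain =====

-- B replaces A's per-cell index permutation (zero grid + transformation() + scattered indexed
-- writes) by two staged structural passes: deinterleave the rows (even positions then odd
-- positions, built by appending to two accumulators), then deinterleave the first n cells of
-- each row (objective: faster by a constant factor — no per-cell helper call, index arithmetic
-- or indexed writes — measured).
-- Equality of RETURN values is proved on Pre_ (rows at least n long); on ragged inputs both
-- Pythons raise IndexError.

-- ===== PORT A =====
-- tableau[i][j] read; inside Pre_ the indices are in range (Python raises IndexError outside Pre_,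
-- where the port uses the default 0 — those inputs are excluded by Pre_photomaton).
def pvCell (t : List (List Int)) (i j : Nat) : Int := ((t[i]?.getD [])[j]?.getD 0)

-- Python's four ifs are exhaustive and mutually exclusive on parities, so the chain is a
-- faithful transcription (the last matching branch is the only matching one).
def transformationP (i j n : Nat) : Nat × Nat :=
  if i % 2 = 0 ∧ j % 2 = 0 then (i / 2, j / 2)
  else if i % 2 = 0 ∧ j % 2 = 1 then (i / 2, (n + j) / 2)
  else if i % 2 = 1 ∧ j % 2 = 0 then ((n + i) / 2, j / 2)
  else ((n + i) / 2, (n + j) / 2)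

def photomaton (tableau : List (List Int)) : List (List Int) :=
  let n := tableau.length
  let nouv := (List.range n).map (fun _ => (List.range n).map (fun _ => (0 : Int)))
  (List.range n).foldl (fun acc i =>
    (List.range n).foldl (fun acc j =>
      let p := transformationP i j n
      acc.modify p.1 (fun row => row.set p.2 (pvCell tableau i j))) acc) nouv

-- ===== PORT B =====
-- the inner helper 'deinterleave': one enumerate loop appending to two accumulators, then evens + odds
def pvDeinterleave {α : Type} (cells : List α) : List α :=
  let p := (PySem.List.enumerate cells 0).foldl
    (fun (acc : List α × List α) kx =>
      if kx.1 % 2 = 0 then (acc.1 ++ [kx.2], acc.2) else (acc.1, acc.2 ++ [kx.2]))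
    ([], [])
  p.1 ++ p.2

-- row[j] read for j in range(n); inside Pre_ in range (Python raises IndexError outside Pre_,
-- where the port uses the default 0 — those inputs are excluded by Pre_photomaton).
def photomaton_alt (tableau : List (List Int)) : List (List Int) :=
  let n := tableau.length
  (pvDeinterleave tableau).map
    (fun row => pvDeinterleave ((List.range n).map (fun j => (row[j]?).getD 0)))

-- ===== PRECONDITION & SPEC =====
-- Pre_ excludes exactly the ragged inputs (some row shorter than the row count) on which the
-- Python A raises IndexError at tableau[i][j].
def Pre_photomaton (tableau : List (List Int)) : Prop :=
  ∀ row ∈ tableau, tableau.length ≤ row.length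

instance (tableau : List (List Int)) : Decidable (Pre_photomaton tableau) := by
  unfold Pre_photomaton; infer_instance

def pvWitness_photomaton : List (List Int) := [[1, 2], [3, 4]]

def Spec_photomaton (tableau : List (List Int)) (out : List (List Int)) : Prop := out = photomaton_alt tableau
instance (tableau : List (List Int)) (out : List (List Int)) : Decidable (Spec_photomaton tableau out) := by unfold Spec_photomaton; infer_instance

-- ===== CLAIM (what is proved, stated in full; the proofs are below) =====
def Claim_equal_photomaton : Prop := ∀ (tableau : List (List Int)), Dom_photomaton tableau → Pre_photomaton tableau → Spec_photomaton tableau (photomaton tableau)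

-- ===== LEMMAS AND PROOFS =====

-- the forward index map A applies to each coordinate, and its inverse
def pvFwd (n i : Nat) : Nat := if i % 2 = 0 then i / 2 else (n + i) / 2
def pvSrc (half k : Nat) : Nat := if k < half then 2 * k else 2 * (k - half) + 1

theorem transformationP_eq (i j n : Nat) :
    transformationP i j n = (pvFwd n i, pvFwd n j) := by
  unfold transformationP pvFwd
  have hi := Nat.mod_two_eq_zero_or_one i
  have hj := Nat.mod_two_eq_zero_or_one j
  split_ifs <;> simp_all

theorem pvFwd_lt {n i : Nat} (h : i < n) : pvFwd n i < n := by
  unfold pvFwd; split_ifs <;> omega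

theorem pvSrc_lt {n k : Nat} (h : k < n) : pvSrc ((n + 1) / 2) k < n := by
  unfold pvSrc; split_ifs <;> omega

theorem pvFwd_src {n k : Nat} (_h : k < n) : pvFwd n (pvSrc ((n + 1) / 2) k) = k := by
  unfold pvFwd pvSrc; split_ifs <;> omega

theorem pvSrc_fwd {n i : Nat} (h : i < n) : pvSrc ((n + 1) / 2) (pvFwd n i) = i := by
  unfold pvFwd pvSrc; split_ifs <;> omega

theorem foldl_set_length (n m : Nat) (v : Nat → Int) (row : List Int) :
    ((List.range m).foldl (fun r j => r.set (pvFwd n j) (v j)) row).length = row.length := by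
  induction m with
  | zero => simp
  | succ m ih => simp [List.range_succ, ih]

-- inner-loop characterisation: after the first m writes, position b holds v (src b) iff its
-- (unique) writer src b has already run
theorem rowfold_getElem (n : Nat) (v : Nat → Int) (row : List Int) (hlen : row.length = n)
    (m : Nat) (hm : m ≤ n) (b : Nat) (hb : b < n) :
    ((List.range m).foldl (fun r j => r.set (pvFwd n j) (v j)) row)[b]? =
      if pvSrc ((n + 1) / 2) b < m then some (v (pvSrc ((n + 1) / 2) b)) else row[b]? := by
  induction m with
  | zero => simp
  | succ m ih =>
    have hm' : m ≤ n := Nat.le_of_succ_le hm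
    rw [List.range_succ, List.foldl_append]
    simp only [List.foldl_cons, List.foldl_nil]
    rw [List.getElem?_set]
    have hlen' : ((List.range m).foldl (fun r j => r.set (pvFwd n j) (v j)) row).length = n := by
      rw [foldl_set_length]; exact hlen
    by_cases hcase : pvFwd n m = b
    · have hsb : pvSrc ((n + 1) / 2) b = m := by
        rw [← hcase, pvSrc_fwd (Nat.lt_of_lt_of_le (Nat.lt_succ_self m) hm)]
      simp [hcase, hsb, hlen', hb]
    · have hsb : pvSrc ((n + 1) / 2) b ≠ m := by
        intro h
        exact hcase (by rw [← h, pvFwd_src hb])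
      rw [if_neg hcase, ih hm']
      have : (pvSrc ((n + 1) / 2) b < m + 1) ↔ (pvSrc ((n + 1) / 2) b < m) := by omega
      simp [this]

-- inner loop on a length-n row = the gathered row
theorem rowfold_eq (n : Nat) (v : Nat → Int) (row : List Int) (hlen : row.length = n) :
    (List.range n).foldl (fun r j => r.set (pvFwd n j) (v j)) row =
      (List.range n).map (fun b => v (pvSrc ((n + 1) / 2) b)) := by
  apply List.ext_getElem?
  intro b
  by_cases hb : b < n
  · rw [rowfold_getElem n v row hlen n le_rfl b hb, if_pos (pvSrc_lt hb)]
    simp [hb]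
  · have h1 : ((List.range n).foldl (fun r j => r.set (pvFwd n j) (v j)) row).length ≤ b := by
      rw [foldl_set_length, hlen]; omega
    rw [List.getElem?_eq_none h1, List.getElem?_eq_none (by simp; omega)]

-- iterated modify at a fixed index commutes out of the fold
theorem foldl_modify_comm (m k : Nat) (h : Nat → List Int → List Int) (a : List (List Int)) :
    (List.range m).foldl (fun acc j => acc.modify k (h j)) a =
      a.modify k (fun r => (List.range m).foldl (fun r j => h j r) r) := by
  induction m generalizing a with
  | zero => exact (List.modify_id k a).symm
  | succ m ih =>
    rw [List.range_succ, List.foldl_append]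
    simp only [List.foldl_cons, List.foldl_nil]
    rw [ih, List.modify_modify_eq]
    congr 1
    funext r
    simp [List.foldl_append]

theorem map_range_modify (n k : Nat) (hk : k < n) (f : Nat → List Int) (h : List Int → List Int) :
    (((List.range n).map f).modify k h) =
      (List.range n).map (fun a => if a = k then h (f k) else f a) := by
  apply List.ext_getElem?
  intro b
  by_cases hb : b < n
  · simp only [List.getElem?_modify, List.getElem?_map, List.getElem?_range, hb,
      Option.map_some]
    by_cases hbk : b = k
    · subst hbk; simp
    · simp [Ne.symm hbk, hbk]
  · rw [List.getElem?_eq_none (by simp; omega), List.getElem?_eq_none (by simp; omega)]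

-- outer-loop invariant: after m outer iterations row a is the gathered row iff its writer src a has run
theorem outer_invariant (tableau : List (List Int)) (m : Nat) (hm : m ≤ tableau.length) :
    (List.range m).foldl (fun acc i =>
        (List.range tableau.length).foldl (fun acc j =>
          let p := transformationP i j tableau.length
          acc.modify p.1 (fun row => row.set p.2 (pvCell tableau i j))) acc)
      ((List.range tableau.length).map (fun _ => (List.range tableau.length).map (fun _ => (0 : Int)))) =
    (List.range tableau.length).map (fun a =>
      if pvSrc ((tableau.length + 1) / 2) a < m then
        (List.range tableau.length).map (fun b =>
          pvCell tableau (pvSrc ((tableau.length + 1) / 2) a) (pvSrc ((tableau.length + 1) / 2) b))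
      else (List.range tableau.length).map (fun _ => (0 : Int))) := by
  set n := tableau.length with hn
  induction m with
  | zero =>
    simp only [List.range_zero, List.foldl_nil]
    refine (List.map_congr_left ?_).symm
    intro a ha
    rw [if_neg (by omega)]
  | succ m ih =>
    have hm' : m ≤ n := Nat.le_of_succ_le hm
    rw [List.range_succ, List.foldl_append]
    simp only [List.foldl_cons, List.foldl_nil]
    rw [ih hm']
    simp only [transformationP_eq]
    rw [foldl_modify_comm n (pvFwd n m) (fun j r => r.set (pvFwd n j) (pvCell tableau m j))]
    have hmn : m < n := hm
    rw [map_range_modify n (pvFwd n m) (pvFwd_lt hmn)]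
    refine List.map_congr_left ?_
    intro a ha
    rw [List.mem_range] at ha
    by_cases hak : a = pvFwd n m
    · subst hak
      have hfwd : pvSrc ((n + 1) / 2) (pvFwd n m) = m := pvSrc_fwd hmn
      rw [if_pos rfl, hfwd, if_neg (by omega), if_pos (by omega)]
      exact rowfold_eq n (fun j => pvCell tableau m j) _ (by simp)
    · have hsa : pvSrc ((n + 1) / 2) a ≠ m := by
        intro h; exact hak (by rw [← h, pvFwd_src ha])
      rw [if_neg hak]
      have : (pvSrc ((n + 1) / 2) a < m + 1) ↔ (pvSrc ((n + 1) / 2) a < m) := by omega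
      simp only [this]

-- B-side: even- and odd-position elements of a list
mutual
def pvEvens {α : Type} : List α → List α
  | [] => []
  | x :: xs => x :: pvOdds xs
def pvOdds {α : Type} : List α → List α
  | [] => []
  | _ :: xs => pvEvens xs
end

theorem evens_odds_getElem {α : Type} (xs : List α) :
    ∀ k : Nat, (pvEvens xs)[k]? = xs[2 * k]? ∧ (pvOdds xs)[k]? = xs[2 * k + 1]? := by
  induction xs with
  | nil => intro k; simp [pvEvens, pvOdds]
  | cons x xs ih =>
    intro k
    constructor
    · cases k with
      | zero => simp [pvEvens]
      | succ k =>
        have := (ih k).2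
        simp only [pvEvens, List.getElem?_cons_succ]
        rw [this]
        have h2 : 2 * (k + 1) = (2 * k + 1) + 1 := by omega
        rw [h2, List.getElem?_cons_succ]
    · have := (ih k).1
      simp only [pvOdds]
      rw [this]
      have h2 : 2 * k + 1 = (2 * k) + 1 := rfl
      rw [h2, List.getElem?_cons_succ]

theorem evens_odds_length {α : Type} (xs : List α) :
    (pvEvens xs).length = (xs.length + 1) / 2 ∧ (pvOdds xs).length = xs.length / 2 := by
  induction xs with
  | nil => simp [pvEvens, pvOdds]
  | cons x xs ih =>
    simp only [pvEvens, pvOdds, List.length_cons]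
    omega

-- the enumerate/accumulator loop of B's deinterleave produces exactly (evens, odds)
theorem enum_fold_eq {α : Type} (xs : List α) :
    ∀ (s : Int) (e o : List α),
      (PySem.List.enumerate xs s).foldl
        (fun (acc : List α × List α) kx =>
          if kx.1 % 2 = 0 then (acc.1 ++ [kx.2], acc.2) else (acc.1, acc.2 ++ [kx.2]))
        (e, o) =
      if s % 2 = 0 then (e ++ pvEvens xs, o ++ pvOdds xs)
      else (e ++ pvOdds xs, o ++ pvEvens xs) := by
  induction xs with
  | nil => intro s e o; simp [PySem.List.enumerate_nil, pvEvens, pvOdds]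
  | cons x xs ih =>
    intro s e o
    rw [PySem.List.enumerate_cons]
    simp only [List.foldl_cons]
    by_cases hs : s % 2 = 0
    · have hs1 : ¬ (s + 1) % 2 = 0 := by omega
      simp only [hs, if_pos]
      rw [ih (s + 1) (e ++ [x]) o, if_neg hs1]
      simp [pvEvens, pvOdds]
    · have hs1 : (s + 1) % 2 = 0 := by omega
      simp only [hs, if_false]
      rw [ih (s + 1) e (o ++ [x]), if_pos hs1]
      simp [pvEvens, pvOdds]

theorem deinterleave_eq {α : Type} (xs : List α) :
    pvDeinterleave xs = pvEvens xs ++ pvOdds xs := by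
  unfold pvDeinterleave
  rw [enum_fold_eq xs 0 [] []]
  simp

-- deinterleave of a length-n list is the gather by pvSrc
theorem deinterleave_gather {α : Type} (xs : List α) (d : α) :
    pvDeinterleave xs =
      (List.range xs.length).map (fun k => (xs[pvSrc ((xs.length + 1) / 2) k]?).getD d) := by
  rw [deinterleave_eq]
  apply List.ext_getElem?
  intro k
  set n := xs.length with hn
  have hlen := evens_odds_length xs
  by_cases hk : k < n
  · have hsrc : pvSrc ((n + 1) / 2) k < n := pvSrc_lt hk
    have hval : (pvEvens xs ++ pvOdds xs)[k]? = xs[pvSrc ((n + 1) / 2) k]? := by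
      by_cases hhalf : k < (n + 1) / 2
      · rw [List.getElem?_append_left (by omega), (evens_odds_getElem xs k).1]
        unfold pvSrc; rw [if_pos hhalf]
      · rw [List.getElem?_append_right (by omega), hlen.1,
          (evens_odds_getElem xs (k - (n + 1) / 2)).2]
        unfold pvSrc; rw [if_neg hhalf]
    rw [hval, List.getElem?_map, List.getElem?_range hk]
    simp [List.getElem?_eq_getElem hsrc]
  · rw [List.getElem?_eq_none (by rw [List.length_append, hlen.1, hlen.2]; omega),
      List.getElem?_eq_none (by simp; omega)]

-- ===== VERDICT helpers: assemble B into the same gathered form =====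
theorem alt_eq_gather (tableau : List (List Int)) (hpre : Pre_photomaton tableau) :
    photomaton_alt tableau =
      (List.range tableau.length).map (fun a =>
        (List.range tableau.length).map (fun b =>
          pvCell tableau (pvSrc ((tableau.length + 1) / 2) a)
            (pvSrc ((tableau.length + 1) / 2) b))) := by
  unfold photomaton_alt
  set n := tableau.length with hn
  rw [deinterleave_gather tableau ([] : List Int), List.map_map]
  refine List.map_congr_left ?_
  intro a ha
  rw [List.mem_range] at ha
  simp only [Function.comp]
  set sa := pvSrc ((n + 1) / 2) a with hsa
  have hsalt : sa < n := pvSrc_lt ha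
  set row := (tableau[sa]?).getD [] with hrow
  have hrowmem : row ∈ tableau := by
    rw [hrow, List.getElem?_eq_getElem hsalt]
    exact List.getElem_mem _
  have hrowlen : n ≤ row.length := hpre row hrowmem
  rw [deinterleave_gather ((List.range n).map (fun j => (row[j]?).getD 0)) (0 : Int)]
  simp only [List.length_map, List.length_range]
  refine List.map_congr_left ?_
  intro b hb
  rw [List.mem_range] at hb
  have hsb : pvSrc ((n + 1) / 2) b < n := pvSrc_lt hb
  unfold pvCell
  rw [List.getElem?_map, List.getElem?_range hsb]
  rfl

-- ===== VERDICT (by name: the statements are the Claim_ definitions above) =====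
theorem photomaton_spec : Claim_equal_photomaton := by
  intro tableau _ hpre
  unfold Spec_photomaton photomaton
  simp only []
  rw [outer_invariant tableau tableau.length le_rfl, alt_eq_gather tableau hpre]
  refine List.map_congr_left ?_
  intro a ha
  rw [List.mem_range] at ha
  rw [if_pos (pvSrc_lt ha)]
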